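-- pv_equiv track=rewrite | github.com/pypi-data/pypi-mirror-404 | packages/py3plex/py3plex-1.1.3.tar.gz/py3plex-1.1.3/py3plex/algorithms/community_detection/leiden_uq.py | canonicalize_partition
-- ===== SOURCE A (Python) =====
-- from typing import Any, Dict, List, Optional, Tuple, Union
--
-- def canonicalize_partition(
--     partition: Dict[Tuple[Any, Any], int],
--     node_order: Optional[List[Tuple[Any, Any]]] = None
-- ) -> Dict[Tuple[Any, Any], int]:
--     """Canonicalize partition labels by relabeling in order of first appearance.
--
--     Args:
--         partition: Dict mapping (node, layer) to community ID
--         node_order: Optional stable node ordering. If None, sorts by keys.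
--
--     Returns:
--         Canonicalized partition with community IDs 0, 1, 2, ...
--     """
--     if node_order is None:
--         node_order = sorted(partition.keys())
--
--     # Map old community IDs to new ones based on first appearance
--     old_to_new = {}
--     next_id = 0
--
--     canonical = {}
--     for node_layer in node_order:
--         if node_layer not in partition:
--             continue
--         old_id = partition[node_layer]
--         if old_id not in old_to_new:
--             old_to_new[old_id] = next_id
--             next_id += 1
--         canonical[node_layer] = old_to_new[old_id]
--
--     return canonical
-- ===== SOURCE B (Python) =====
-- def canonicalize_partition(partition, node_order=None):
--     """Rank-by-first-occurrence: record the position at which each community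
--     first occurs, rank the communities by sorting on those positions, then
--     relabel every node through the rank table."""
--     if node_order is None:
--         node_order = sorted(partition.keys())
--     first = {}
--     for pos, nl in enumerate(node_order):
--         if nl in partition:
--             first.setdefault(partition[nl], pos)
--     rank = {old: r for r, (old, _) in enumerate(sorted(first.items(), key=lambda kv: kv[1]))}
--     return {nl: rank[partition[nl]] for nl in node_order if nl in partition}
-- ===== Notes on version B (the rewrite author's own statement) =====
-- stated objective: alternative
-- what changed: Replaces A's single fused pass that threads an incremental old->new counter dict through node_order with a rank-by-first-occurrence scheme: record each community's first-occurrence position via enumerate+setdefault, sort the (community, position) pairs by position and rank them, then relabel every node through that rank table in a final comprehension.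
import Mathlib
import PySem

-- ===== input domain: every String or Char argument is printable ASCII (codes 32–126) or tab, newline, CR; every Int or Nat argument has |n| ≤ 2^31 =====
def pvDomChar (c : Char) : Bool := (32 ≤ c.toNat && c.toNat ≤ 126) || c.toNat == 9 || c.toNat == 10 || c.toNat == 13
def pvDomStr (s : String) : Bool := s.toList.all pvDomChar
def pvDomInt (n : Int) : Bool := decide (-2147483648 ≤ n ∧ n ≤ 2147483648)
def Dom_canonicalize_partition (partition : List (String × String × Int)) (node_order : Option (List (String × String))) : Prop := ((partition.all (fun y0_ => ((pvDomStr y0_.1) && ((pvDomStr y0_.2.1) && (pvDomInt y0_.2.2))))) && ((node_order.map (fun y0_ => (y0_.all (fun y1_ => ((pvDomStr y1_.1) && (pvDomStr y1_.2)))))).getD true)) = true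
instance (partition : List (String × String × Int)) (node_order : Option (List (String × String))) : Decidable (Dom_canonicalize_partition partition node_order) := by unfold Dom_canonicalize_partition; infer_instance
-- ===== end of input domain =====

-- B replaces A's fused pass (incremental old->new counter dict + next_id) by rank-by-first-occurrence:
-- record each community's first position with enumerate+setdefault, sort the (community, position)
-- pairs by position and rank them, then relabel through the rank table. Objective: alternative.

-- ===== PORT A =====
-- shared input normalization (both Pythons see the same dict argument and the same
-- 'sorted(partition.keys())' default): the Python dict is modelled by inserting the
-- association list's pairs in order (later duplicates overwrite, keeping position)
def pvDictOf (partition : List (String × String × Int)) : PySem.Dict (String × String) Int :=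
  partition.foldl (fun dd p => dd.insert (p.1, p.2.1) p.2.2) PySem.Dict.empty

def pvOrderOf (partition : List (String × String × Int)) (node_order : Option (List (String × String))) : List (String × String) :=
  match node_order with
  | none => PySem.List.sorted2 (pvDictOf partition).keys (fun p => p.1) (fun p => p.2)
  | some l => l

-- A's loop body: state = (old_to_new, next_id, canonical); 'old_to_new[old_id]' is a lookup
-- of a key that is always present at that point, ported as getD _ 0
def pvAStep (d : PySem.Dict (String × String) Int)
    (st : PySem.Dict Int Int × Int × PySem.Dict (String × String) Int) (nl : String × String) :
    PySem.Dict Int Int × Int × PySem.Dict (String × String) Int :=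
  match d.get? nl with
  | none => st
  | some old =>
    let st1 := if st.1.contains old then st else (st.1.insert old st.2.1, st.2.1 + 1, st.2.2)
    (st1.1, st1.2.1, st1.2.2.insert nl (st1.1.getD old 0))

def canonicalize_partition (partition : List (String × String × Int)) (node_order : Option (List (String × String))) : List (String × String × Int) :=
  let d := pvDictOf partition
  let order := pvOrderOf partition node_order
  let st := order.foldl (pvAStep d)
    ((PySem.Dict.empty : PySem.Dict Int Int), (0 : Int), (PySem.Dict.empty : PySem.Dict (String × String) Int))
  st.2.2.items.map (fun p => (p.1.1, p.1.2, p.2))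

-- ===== PORT B =====
-- B's first loop body: first.setdefault(partition[nl], pos) guarded by 'nl in partition'
def pvFirstStep (d : PySem.Dict (String × String) Int)
    (F : PySem.Dict Int Int) (p : Int × (String × String)) : PySem.Dict Int Int :=
  match d.get? p.2 with
  | none => F
  | some old => F.setdefault old p.1

-- B's final comprehension body; 'rank[partition[nl]]' always finds its key, ported as getD _ 0
def pvFinalStep (d : PySem.Dict (String × String) Int) (rank : PySem.Dict Int Int)
    (c : PySem.Dict (String × String) Int) (nl : String × String) : PySem.Dict (String × String) Int :=
  match d.get? nl with
  | none => c
  | some old => c.insert nl (rank.getD old 0)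

def canonicalize_partition_alt (partition : List (String × String × Int)) (node_order : Option (List (String × String))) : List (String × String × Int) :=
  let d := pvDictOf partition
  let order := pvOrderOf partition node_order
  let first := (PySem.List.enumerate order 0).foldl (pvFirstStep d) PySem.Dict.empty
  let sortedItems := PySem.List.sorted first.items (fun kv => kv.2) false
  let rank := (PySem.List.enumerate sortedItems 0).foldl
    (fun R p => R.insert p.2.1 p.1) (PySem.Dict.empty : PySem.Dict Int Int)
  (order.foldl (pvFinalStep d rank) PySem.Dict.empty).items.map (fun p => (p.1.1, p.1.2, p.2))

-- ===== PRECONDITION & SPEC =====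
def Spec_canonicalize_partition (partition : List (String × String × Int)) (node_order : Option (List (String × String))) (out : List (String × String × Int)) : Prop := out = canonicalize_partition_alt partition node_order
instance (partition : List (String × String × Int)) (node_order : Option (List (String × String))) (out : List (String × String × Int)) : Decidable (Spec_canonicalize_partition partition node_order out) := by unfold Spec_canonicalize_partition; infer_instance

-- ===== CLAIM (what is proved, stated in full; the proofs are below) =====
def Claim_equal_canonicalize_partition : Prop := ∀ (partition : List (String × String × Int)) (node_order : Option (List (String × String))), Dom_canonicalize_partition partition node_order → Spec_canonicalize_partition partition node_order (canonicalize_partition partition node_order)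

-- ===== LEMMAS AND PROOFS =====

-- proof device: the canonical dict where each node is sent to the position of its old ID in the
-- first-appearance dedup list; A's fold and B's fold are each shown equal to this fold
def pvIdxStep (d : PySem.Dict (String × String) Int) (uniq : List Int)
    (c : PySem.Dict (String × String) Int) (nl : String × String) : PySem.Dict (String × String) Int :=
  match d.get? nl with
  | none => c
  | some old => c.insert nl ((uniq.idxOf old : Int))

-- A's fold, started from a state representing the dedup list u of the old IDs seen so far,
-- builds the same canonical dict as the idxOf fold over the full dedup list.
theorem pvLoop_eq (d : PySem.Dict (String × String) Int) :
    ∀ (order : List (String × String)) (u : List Int) (o2n : PySem.Dict Int Int)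
      (can : PySem.Dict (String × String) Int),
      u.Nodup →
      (∀ x : Int, o2n.contains x = decide (x ∈ u)) →
      (∀ x ∈ u, o2n.getD x 0 = (u.idxOf x : Int)) →
      (order.foldl (pvAStep d) (o2n, (u.length : Int), can)).2.2
        = order.foldl (pvIdxStep d (PySem.Set.update u (order.filterMap (fun nl => d.get? nl)))) can := by
  intro order
  induction order with
  | nil => intro u o2n can _ _ _; rfl
  | cons nl rest ih =>
    intro u o2n can hnd hcont hgetD
    simp only [List.foldl_cons, List.filterMap_cons]
    cases hget : d.get? nl with
    | none =>
      simp only [pvAStep, pvIdxStep, hget]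
      exact ih u o2n can hnd hcont hgetD
    | some old =>
      simp only [pvAStep, pvIdxStep, hget]
      have hUapp : ∀ (s : List Int), ∃ t, PySem.Set.update u s = u ++ t :=
        fun s => ⟨_, PySem.Set.update_eq_append_filter u s⟩
      by_cases hmem : old ∈ u
      · -- old id already seen: A looks it up, the idxOf fold finds the same position
        have hc : o2n.contains old = true := by rw [hcont]; simp [hmem]
        simp only [hc, if_true]
        rw [PySem.Set.update_cons, PySem.Set.add_of_mem hmem]
        obtain ⟨t, ht⟩ := hUapp (rest.filterMap (fun nl => d.get? nl))
        have hidx : (PySem.Set.update u (rest.filterMap (fun nl => d.get? nl))).idxOf old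
            = u.idxOf old := by rw [ht]; exact List.idxOf_append_of_mem hmem
        rw [hidx, ← hgetD old hmem]
        exact ih u o2n _ hnd hcont hgetD
      · -- new old id: A appends it with next_id = u.length, the idxOf fold sees it at u.length
        have hc : o2n.contains old = false := by rw [hcont]; simp [hmem]
        simp only [hc, Bool.false_eq_true, if_false]
        rw [PySem.Set.update_cons, PySem.Set.add_of_not_mem hmem]
        have hnd' : (u ++ [old]).Nodup := by
          refine List.Nodup.append hnd (List.nodup_singleton old) ?_
          intro a ha hb
          simp only [List.mem_singleton] at hb
          exact hmem (hb ▸ ha)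
        have hcont' : ∀ x : Int, (o2n.insert old (u.length : Int)).contains x
            = decide (x ∈ u ++ [old]) := by
          intro x
          rw [PySem.Dict.contains_insert, hcont]
          by_cases hx : x = old <;> simp [hx]
        have hgetD' : ∀ x ∈ u ++ [old],
            (o2n.insert old (u.length : Int)).getD x 0 = ((u ++ [old]).idxOf x : Int) := by
          intro x hx
          rw [PySem.Dict.getD_insert]
          by_cases hxo : x = old
          · subst hxo
            rw [if_pos rfl, List.idxOf_append_of_notMem hmem]
            simp
          · have hxu : x ∈ u := by
              rcases List.mem_append.1 hx with h | h
              · exact h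
              · simp at h; exact absurd h hxo
            rw [if_neg hxo, hgetD x hxu, List.idxOf_append_of_mem hxu]
        have hlen : ((u ++ [old]).length : Int) = (u.length : Int) + 1 := by
          simp
        have hidx : (PySem.Set.update (u ++ [old]) (rest.filterMap (fun nl => d.get? nl))).idxOf old
            = u.length := by
          obtain ⟨t, ht⟩ := (fun s => ⟨_, PySem.Set.update_eq_append_filter (u ++ [old]) s⟩ :
            ∀ (s : List Int), ∃ t, PySem.Set.update (u ++ [old]) s = (u ++ [old]) ++ t)
            (rest.filterMap (fun nl => d.get? nl))
          rw [ht, List.idxOf_append_of_mem (by simp), List.idxOf_append_of_notMem hmem]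
          simp
        rw [PySem.Dict.getD_insert_self, hidx, ← hlen]
        exact ih (u ++ [old]) _ _ hnd' hcont' hgetD'

-- invariant of B's first-occurrence loop: keys accumulate the dedup sequence in order,
-- stored positions stay strictly increasing along the items list, keys stay Nodup
theorem pvFirst_inv (d : PySem.Dict (String × String) Int) :
    ∀ (order : List (String × String)) (s : Int) (F : PySem.Dict Int Int),
      F.keys.Nodup →
      F.items.Pairwise (fun a b => a.2 < b.2) →
      (∀ p ∈ F.items, p.2 < s) →
      ((PySem.List.enumerate order s).foldl (pvFirstStep d) F).keys
          = PySem.Set.update F.keys (order.filterMap (fun nl => d.get? nl))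
        ∧ ((PySem.List.enumerate order s).foldl (pvFirstStep d) F).items.Pairwise (fun a b => a.2 < b.2)
        ∧ ((PySem.List.enumerate order s).foldl (pvFirstStep d) F).keys.Nodup := by
  intro order
  induction order with
  | nil =>
    intro s F h1 h2 h3
    simp [PySem.List.enumerate_nil, PySem.Set.update]
    exact ⟨h2, h1⟩
  | cons nl rest ih =>
    intro s F h1 h2 h3
    rw [PySem.List.enumerate_cons]
    simp only [List.foldl_cons, List.filterMap_cons]
    cases hget : d.get? nl with
    | none => simpa [pvFirstStep, hget] using ih (s + 1) F h1 h2 (fun p hp => lt_trans (h3 p hp) (by omega))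
    | some old =>
      simp only [pvFirstStep, hget]
      by_cases hc : F.contains old
      · rw [PySem.Dict.setdefault_of_contains F s hc, PySem.Set.update_cons,
          PySem.Set.add_of_mem (by rwa [← PySem.Dict.contains_iff_mem_keys])]
        exact ih (s + 1) F h1 h2 (fun p hp => lt_trans (h3 p hp) (by omega))
      · have hc' : F.contains old = false := by simpa using hc
        rw [PySem.Dict.setdefault_of_not_contains F s hc', PySem.Set.update_cons,
          PySem.Set.add_of_not_mem (by rw [← PySem.Dict.contains_iff_mem_keys]; simp [hc'])]
        have hk : (F.insert old s).keys = F.keys ++ [old] :=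
          PySem.Dict.keys_insert_of_not_contains F s hc'
        have hi : (F.insert old s).items = F.items ++ [(old, s)] :=
          PySem.Dict.items_insert_of_not_contains F s hc'
        have h1' : (F.insert old s).keys.Nodup := by
          rw [hk]
          refine List.Nodup.append h1 (List.nodup_singleton old) ?_
          intro a ha hb
          simp only [List.mem_singleton] at hb
          subst hb
          rw [← PySem.Dict.contains_iff_mem_keys] at ha
          simp [hc'] at ha
        have h2' : (F.insert old s).items.Pairwise (fun a b => a.2 < b.2) := by
          rw [hi]
          refine List.pairwise_append.2 ⟨h2, List.pairwise_singleton _ _, ?_⟩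
          intro a ha b hb
          simp only [List.mem_singleton] at hb
          subst hb
          exact h3 a ha
        have h3' : ∀ p ∈ (F.insert old s).items, p.2 < s + 1 := by
          intro p hp
          rw [hi] at hp
          rcases List.mem_append.1 hp with h | h
          · exact lt_trans (h3 p h) (by omega)
          · simp only [List.mem_singleton] at h; subst h; omega
        have := ih (s + 1) (F.insert old s) h1' h2' h3'
        rwa [hk] at this
-- the rank-building fold leaves keys it never inserts untouched
theorem pvRank_skip (L : List (Int × Int)) :
    ∀ (s : Int) (R : PySem.Dict Int Int) (old : Int), old ∉ L.map (fun q => q.1) →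
      ((PySem.List.enumerate L s).foldl (fun R p => R.insert p.2.1 p.1) R).getD old 0
        = R.getD old 0 := by
  induction L with
  | nil => intro s R old _; simp [PySem.List.enumerate_nil]
  | cons q rest ih =>
    intro s R old h
    simp only [List.map_cons, List.mem_cons, not_or] at h
    rw [PySem.List.enumerate_cons]
    simp only [List.foldl_cons]
    rw [ih (s + 1) _ old h.2, PySem.Dict.getD_insert, if_neg h.1]

-- the rank table sends each key of L to s + its position in L's key list
theorem pvRank_getD (L : List (Int × Int)) :
    ∀ (s : Int) (R : PySem.Dict Int Int) (old : Int),
      (L.map (fun q => q.1)).Nodup → old ∈ L.map (fun q => q.1) →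
      ((PySem.List.enumerate L s).foldl (fun R p => R.insert p.2.1 p.1) R).getD old 0
        = s + ((L.map (fun q => q.1)).idxOf old : Int) := by
  induction L with
  | nil => intro s R old _ h; simp at h
  | cons q rest ih =>
    intro s R old hnd hmem
    simp only [List.map_cons, List.nodup_cons] at hnd
    rw [PySem.List.enumerate_cons]
    simp only [List.foldl_cons]
    by_cases hq : old = q.1
    · rw [hq, pvRank_skip rest (s + 1) _ q.1 hnd.1, PySem.Dict.getD_insert_self]
      simp [List.idxOf_cons_self]
    · have hmem' : old ∈ rest.map (fun q => q.1) := by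
        simp only [List.map_cons, List.mem_cons] at hmem
        exact hmem.resolve_left hq
      rw [ih (s + 1) _ old hnd.2 hmem']
      have hstep : (q.1 :: rest.map (fun q => q.1)).idxOf old
          = (rest.map (fun q => q.1)).idxOf old + 1 :=
        List.idxOf_cons_ne _ (fun a => hq a.symm)
      simp only [List.map_cons, hstep]
      push_cast
      ring

-- ===== VERDICT (by name: the statement is the Claim_ definition above) =====
theorem canonicalize_partition_spec : Claim_equal_canonicalize_partition := by
  intro partition node_order _
  unfold Spec_canonicalize_partition canonicalize_partition canonicalize_partition_alt
  set d := pvDictOf partition with hd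
  set order := pvOrderOf partition node_order with horder
  set seq := order.filterMap (fun nl => d.get? nl) with hseq
  set uniq : List Int := PySem.Set.ofList seq with huniq
  -- characterize B's first / rank tables
  set first := (PySem.List.enumerate order 0).foldl (pvFirstStep d) PySem.Dict.empty with hfirst
  obtain ⟨hkeys, hpw, hnd⟩ := pvFirst_inv d order 0 PySem.Dict.empty
    (by simp [PySem.Dict.keys_empty]) List.Pairwise.nil (by intro p hp; exact absurd hp (List.not_mem_nil))
  have hkeys' : first.keys = uniq := by
    rw [← hfirst] at hkeys
    rw [hkeys, huniq, hseq]
    simp [PySem.Dict.keys_empty, PySem.Set.update, PySem.Set.ofList_eq_foldl]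
  rw [← hfirst] at hpw hnd
  have hsorted : PySem.List.sorted first.items (fun kv => kv.2) false = first.items :=
    PySem.List.sorted_eq_self_of_pairwise first.items (fun kv => kv.2) (hpw.imp (fun h => le_of_lt h))
  have hkeysdef : first.items.map (fun q => q.1) = first.keys := rfl
  set rank := (PySem.List.enumerate (PySem.List.sorted first.items (fun kv => kv.2) false) 0).foldl
    (fun R p => R.insert p.2.1 p.1) (PySem.Dict.empty : PySem.Dict Int Int) with hrank
  have hrankD : ∀ old ∈ uniq, rank.getD old 0 = (uniq.idxOf old : Int) := by
    intro old hmem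
    rw [hrank, hsorted, pvRank_getD first.items 0 _ old
      (by rw [hkeysdef]; exact hnd) (by rw [hkeysdef, hkeys']; exact hmem)]
    rw [hkeysdef, hkeys']
    ring
  -- both folds compute the idxOf fold
  have hA := pvLoop_eq d order [] PySem.Dict.empty PySem.Dict.empty List.nodup_nil
    (fun x => by simp [PySem.Dict.contains_empty])
    (fun x hx => absurd hx (List.not_mem_nil))
  simp only [List.length_nil, Nat.cast_zero] at hA
  have hu : PySem.Set.update ([] : List Int) seq = uniq := by
    rw [huniq]
    simp [PySem.Set.update, PySem.Set.ofList_eq_foldl]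
  rw [← hseq, hu] at hA
  have hB : order.foldl (pvFinalStep d rank) PySem.Dict.empty
      = order.foldl (pvIdxStep d uniq) PySem.Dict.empty := by
    apply PySem.List.foldl_congr_mem
    intro c nl hnl
    unfold pvFinalStep pvIdxStep
    cases hget : d.get? nl with
    | none => rfl
    | some old =>
      have hin : old ∈ uniq := by
        rw [huniq, PySem.Set.mem_ofList, hseq]
        exact List.mem_filterMap.2 ⟨nl, hnl, hget⟩
      show c.insert nl (rank.getD old 0) = c.insert nl ((uniq.idxOf old : Int))
      rw [hrankD old hin]
  show (List.foldl (pvAStep d) (PySem.Dict.empty, 0, PySem.Dict.empty) order).2.2.items.map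
      (fun p => (p.1.1, p.1.2, p.2))
    = (List.foldl (pvFinalStep d rank) PySem.Dict.empty order).items.map (fun p => (p.1.1, p.1.2, p.2))
  rw [hA, hB]
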